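-- pv_equiv track=rewrite | github.com/hitomi1/usp | 2024.2/aaa-scc0218/guloso2/e2_teste.py | max_cost
-- ===== SOURCE A (Python) =====
-- def max_cost(tasks):
--     tasks.sort()
--     current_time = 0
--     total_cost = 0
--
--     for t, d in tasks:
--         end_time = current_time + t
--         total_cost += d - end_time
--         current_time = end_time
--
--     return total_cost
-- ===== SOURCE B (Python) =====
-- def max_cost(tasks):
--     tasks.sort()
--     n = len(tasks)
--     return sum(d for _, d in tasks) - sum(t * (n - i) for i, (t, _) in enumerate(tasks))
-- ===== Notes on version B (the rewrite author's own statement) =====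
-- stated objective: simpler
-- what changed: Replaces the sequential current_time/total_cost accumulation with a closed-form index-weighted single pass: sum of deadlines minus sum of t*(n-i) over the sorted list.
import Mathlib
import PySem

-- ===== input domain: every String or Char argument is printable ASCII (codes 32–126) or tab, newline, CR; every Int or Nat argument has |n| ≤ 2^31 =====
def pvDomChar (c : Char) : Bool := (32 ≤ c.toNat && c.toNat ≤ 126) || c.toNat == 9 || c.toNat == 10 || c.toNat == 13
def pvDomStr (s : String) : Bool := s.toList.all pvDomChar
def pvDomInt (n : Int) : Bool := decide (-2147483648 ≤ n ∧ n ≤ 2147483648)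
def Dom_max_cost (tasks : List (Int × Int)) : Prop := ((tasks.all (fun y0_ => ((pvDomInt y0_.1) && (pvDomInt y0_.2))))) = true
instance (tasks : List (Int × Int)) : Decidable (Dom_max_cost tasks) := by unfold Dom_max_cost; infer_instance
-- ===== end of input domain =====

-- B replaces A's sequential current_time accumulation with a closed-form
-- index-weighted sum over the sorted list (simpler decomposition; same cost).
-- A sorts its argument in place; the equivalence proved here is about the return value.


-- ===== PORT A =====
-- tasks.sort(): Python tuple order on pairs = sorted2 with fst/snd keys
def max_cost (tasks : List (Int × Int)) : Int :=
  let s := PySem.List.sorted2 tasks (fun x => x.1) (fun x => x.2)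
  (s.foldl (fun (st : Int × Int) td =>
      let end_time := st.1 + td.1
      (end_time, st.2 + (td.2 - end_time))) (0, 0)).2

-- ===== PORT B =====
def max_cost_alt (tasks : List (Int × Int)) : Int :=
  let s := PySem.List.sorted2 tasks (fun x => x.1) (fun x => x.2)
  let n : Int := s.length
  (s.map (fun td => td.2)).sum
    - ((PySem.List.enumerate s).map (fun p => p.2.1 * (n - p.1))).sum

-- ===== PRECONDITION & SPEC =====
def Spec_max_cost (tasks : List (Int × Int)) (out : Int) : Prop := out = max_cost_alt tasks
instance (tasks : List (Int × Int)) (out : Int) : Decidable (Spec_max_cost tasks out) := by unfold Spec_max_cost; infer_instance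

-- ===== CLAIM (what is proved, stated in full; the proofs are below) =====
def Claim_equal_max_cost : Prop := ∀ (tasks : List (Int × Int)), Dom_max_cost tasks → Spec_max_cost tasks (max_cost tasks)

-- ===== LEMMAS AND PROOFS =====

-- weighted enumerate sum used to characterise both programs
def pvW (s : List (Int × Int)) (a n : Int) : Int :=
  ((PySem.List.enumerate s a).map (fun p => p.2.1 * (n - p.1))).sum

theorem pvW_cons (x : Int × Int) (s : List (Int × Int)) (a n : Int) :
    pvW (x :: s) a n = x.1 * (n - a) + pvW s (a + 1) n := by
  simp [pvW, PySem.List.enumerate_cons]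

theorem pvW_shift (s : List (Int × Int)) (a n : Int) :
    pvW s (a + 1) (n + 1) = pvW s a n := by
  induction s generalizing a n with
  | nil => simp [pvW, PySem.List.enumerate_nil]
  | cons x s ih =>
      rw [pvW_cons, pvW_cons]
      have h : a + 1 + 1 = (a + 1) + 1 := rfl
      rw [h, ih]
      ring_nf

-- A's loop on any list, with arbitrary start state, equals the closed form.
theorem pv_loop_char (s : List (Int × Int)) (c tot : Int) :
    (s.foldl (fun (st : Int × Int) td =>
        let end_time := st.1 + td.1
        (end_time, st.2 + (td.2 - end_time))) (c, tot)).2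
    = tot + (s.map (fun td => td.2)).sum - pvW s 0 (s.length : Int)
        - (s.length : Int) * c := by
  induction s generalizing c tot with
  | nil => simp [pvW, PySem.List.enumerate_nil]
  | cons x s ih =>
      simp only [List.foldl_cons, List.map_cons, List.sum_cons, List.length_cons]
      rw [ih, pvW_cons]
      have h : pvW s 1 ((s.length : Int) + 1) = pvW s 0 (s.length : Int) := by
        simpa using pvW_shift s 0 (s.length : Int)
      push_cast
      rw [h]
      ring

theorem max_cost_eq_alt (tasks : List (Int × Int)) :
    max_cost tasks = max_cost_alt tasks := by
  unfold max_cost max_cost_alt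
  rw [pv_loop_char]
  simp [pvW]

-- ===== VERDICT (by name: the statement is the Claim_ definition above) =====
theorem max_cost_spec : Claim_equal_max_cost := by
  intro tasks _
  unfold Spec_max_cost
  exact max_cost_eq_alt tasks
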